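-- pv_equiv track=rewrite | github.com/jaineel-vyas/Language_Classifier | train.py | prefsufx
-- ===== SOURCE A (Python) =====
-- def prefsufx(line):
--
--     words = line.split(" ")
--
--     k = 'False'
--     suffix = ('ische', 'thie', 'thische', 'thisch', 'achtige', 'achtig', 'aar', 'ator', 'ares', 'oot', 'oaat',
--               'istiek', 'isch', 'schap', 'drecht', 'etje', 'euse', 'lijk', 'lijks', 'lieden', 'foob', 'foon', 'vol'
--               , 'vrij', 'vrouw', 'aat', 'aats', 'eur', 'eus', 'loog', 'geen', 'zamm', 'zuur', 'zelf', 'uur', 'trice'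
--               , 'sch', 'sfeer', 'nomie', 'ica', 'aan')
--
--     preffix = ('er', 'ont', 'ver', 'eth', 'exa', 'carcino', 'cyano', 'chloor', 'buiten', 'bij', 'aan', 'aarts', 'atto'
--                , 'hoodf', 'hept' , 'jood', 'tyfus', 'voor', 'weer', 'wan', 'weder', 'oor', 'onder', 'foto', 'filo')
--
--     for word in words:
--         if word.lower().startswith(preffix):
--             return 'True'
--         if word.lower().endswith(suffix):
--             return 'True'
--
--     return k
-- ===== SOURCE B (Python) =====
-- SUFFIXES = ('ische', 'thie', 'thische', 'thisch', 'achtige', 'achtig', 'aar', 'ator', 'ares', 'oot', 'oaat',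
--             'istiek', 'isch', 'schap', 'drecht', 'etje', 'euse', 'lijk', 'lijks', 'lieden', 'foob', 'foon', 'vol',
--             'vrij', 'vrouw', 'aat', 'aats', 'eur', 'eus', 'loog', 'geen', 'zamm', 'zuur', 'zelf', 'uur', 'trice',
--             'sch', 'sfeer', 'nomie', 'ica', 'aan')
--
-- PREFIXES = ('er', 'ont', 'ver', 'eth', 'exa', 'carcino', 'cyano', 'chloor', 'buiten', 'bij', 'aan', 'aarts', 'atto',
--             'hoodf', 'hept', 'jood', 'tyfus', 'voor', 'weer', 'wan', 'weder', 'oor', 'onder', 'foto', 'filo')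
--
--
-- def prefsufx(line):
--     # Single left-to-right scan of the whole lowercased line: a word of
--     # line.split(" ") starts right after a space (or at position 0) and ends
--     # right before a space (or at the end), so check the prefix/suffix sets
--     # at those boundary positions instead of materialising the word list.
--     s = line.lower()
--     n = len(s)
--     for i in range(n + 1):
--         if (i == 0 or s[i - 1] == ' ') and s.startswith(PREFIXES, i):
--             return 'True'
--         if (i == n or s[i] == ' ') and s.endswith(SUFFIXES, 0, i):
--             return 'True'
--     return 'False'
-- ===== Notes on version B (the rewrite author's own statement) =====
-- stated objective: alternative
-- what changed: Instead of splitting the line into a word list and testing each word, B lowercases the line once and makes a single positional scan, testing the prefix set at word-start boundaries (position 0 or after a space) and the suffix set at word-end boundaries (end of line or before a space), with no word list materialised.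
import Mathlib
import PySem

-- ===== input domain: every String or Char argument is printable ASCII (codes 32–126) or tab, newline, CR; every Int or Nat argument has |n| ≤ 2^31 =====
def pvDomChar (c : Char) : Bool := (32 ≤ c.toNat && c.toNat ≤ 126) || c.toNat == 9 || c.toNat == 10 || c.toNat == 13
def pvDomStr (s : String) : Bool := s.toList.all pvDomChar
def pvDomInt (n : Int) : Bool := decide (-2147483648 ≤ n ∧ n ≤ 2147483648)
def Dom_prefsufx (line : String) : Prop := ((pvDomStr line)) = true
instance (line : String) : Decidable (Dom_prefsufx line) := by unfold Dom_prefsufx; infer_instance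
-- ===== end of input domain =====

-- B replaces A's split-into-words-then-test-each-word loop by one positional scan of the
-- lowercased line, testing prefixes at word starts and suffixes at word ends (alternative
-- decomposition, same cost, no word list built).

-- ===== PORT A =====
-- the suffix tuple, in A's order
def pvSfx : List (List Char) :=
  ["ische".toList, "thie".toList, "thische".toList, "thisch".toList, "achtige".toList,
   "achtig".toList, "aar".toList, "ator".toList, "ares".toList, "oot".toList, "oaat".toList,
   "istiek".toList, "isch".toList, "schap".toList, "drecht".toList, "etje".toList,
   "euse".toList, "lijk".toList, "lijks".toList, "lieden".toList, "foob".toList,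
   "foon".toList, "vol".toList, "vrij".toList, "vrouw".toList, "aat".toList, "aats".toList,
   "eur".toList, "eus".toList, "loog".toList, "geen".toList, "zamm".toList, "zuur".toList,
   "zelf".toList, "uur".toList, "trice".toList, "sch".toList, "sfeer".toList,
   "nomie".toList, "ica".toList, "aan".toList]

-- the prefix tuple, in A's order
def pvPfx : List (List Char) :=
  ["er".toList, "ont".toList, "ver".toList, "eth".toList, "exa".toList, "carcino".toList,
   "cyano".toList, "chloor".toList, "buiten".toList, "bij".toList, "aan".toList,
   "aarts".toList, "atto".toList, "hoodf".toList, "hept".toList, "jood".toList,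
   "tyfus".toList, "voor".toList, "weer".toList, "wan".toList, "weder".toList,
   "oor".toList, "onder".toList, "foto".toList, "filo".toList]

-- A's for-loop over words (strings as char lists); startswith/endswith with a tuple = any over it
def prefsufxLoop (words : List (List Char)) : String :=
  match words with
  | [] => "False"
  | w :: ws =>
    if pvPfx.any (fun p => PySem.Chars.startswith (PySem.Chars.lower w) p) then "True"
    else if pvSfx.any (fun q => PySem.Chars.endswith (PySem.Chars.lower w) q) then "True"
    else prefsufxLoop ws

def prefsufx (line : String) : String :=
  prefsufxLoop (PySem.Chars.splitOn line.toList [' '])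

-- ===== PORT B =====
-- Source B's constant tuples as character tables (each entry is one Python string literal)
def bPfx : List (List Char) :=
  [['e','r'], ['o','n','t'], ['v','e','r'], ['e','t','h'], ['e','x','a'],
   ['c','a','r','c','i','n','o'], ['c','y','a','n','o'], ['c','h','l','o','o','r'],
   ['b','u','i','t','e','n'], ['b','i','j'], ['a','a','n'], ['a','a','r','t','s'],
   ['a','t','t','o'], ['h','o','o','d','f'], ['h','e','p','t'], ['j','o','o','d'],
   ['t','y','f','u','s'], ['v','o','o','r'], ['w','e','e','r'], ['w','a','n'],
   ['w','e','d','e','r'], ['o','o','r'], ['o','n','d','e','r'], ['f','o','t','o'],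
   ['f','i','l','o']]

def bSfx : List (List Char) :=
  [['i','s','c','h','e'], ['t','h','i','e'], ['t','h','i','s','c','h','e'],
   ['t','h','i','s','c','h'], ['a','c','h','t','i','g','e'], ['a','c','h','t','i','g'],
   ['a','a','r'], ['a','t','o','r'], ['a','r','e','s'], ['o','o','t'], ['o','a','a','t'],
   ['i','s','t','i','e','k'], ['i','s','c','h'], ['s','c','h','a','p'],
   ['d','r','e','c','h','t'], ['e','t','j','e'], ['e','u','s','e'], ['l','i','j','k'],
   ['l','i','j','k','s'], ['l','i','e','d','e','n'], ['f','o','o','b'], ['f','o','o','n'],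
   ['v','o','l'], ['v','r','i','j'], ['v','r','o','u','w'], ['a','a','t'], ['a','a','t','s'],
   ['e','u','r'], ['e','u','s'], ['l','o','o','g'], ['g','e','e','n'], ['z','a','m','m'],
   ['z','u','u','r'], ['z','e','l','f'], ['u','u','r'], ['t','r','i','c','e'], ['s','c','h'],
   ['s','f','e','e','r'], ['n','o','m','i','e'], ['i','c','a'], ['a','a','n']]

-- Source B's scan: for i in range(n+1); s.startswith(PREFIXES, i) is a prefix test on s[i:]
-- (exact for 0 ≤ i ≤ n), s.endswith(SUFFIXES, 0, i) a suffix test on s[:i]; the boundary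
-- accesses s[i-1]/s[i] are always in range when reached (short-circuit), so getD is exact.
def bScan (s : List Char) (i : Nat) : String :=
  if hstop : s.length < i then "False"
  else if (i = 0 ∨ s.getD (i-1) '_' = ' ') ∧ bPfx.any (fun p => p.isPrefixOf (s.drop i)) = true
    then "True"
  else if (i = s.length ∨ s.getD i '_' = ' ') ∧ bSfx.any (fun q => q.isSuffixOf (s.take i)) = true
    then "True"
  else bScan s (i+1)
termination_by s.length + 1 - i
decreasing_by omega

def prefsufx_alt (line : String) : String :=
  bScan (PySem.Chars.lower line.toList) 0

-- ===== PRECONDITION & SPEC =====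
def Spec_prefsufx (line : String) (out : String) : Prop := out = prefsufx_alt line
instance (line : String) (out : String) : Decidable (Spec_prefsufx line out) := by unfold Spec_prefsufx; infer_instance

-- ===== CLAIM (what is proved, stated in full; the proofs are below) =====
def Claim_equal_prefsufx : Prop := ∀ (line : String), Dom_prefsufx line → Spec_prefsufx line (prefsufx line)

-- ===== LEMMAS AND PROOFS =====

-- simple recursive characterisation of Python's split(" ")
def consHead (pre : List Char) : List (List Char) → List (List Char)
  | [] => [pre]
  | p :: t => (pre ++ p) :: t

def spw : List Char → List (List Char)
  | [] => [[]]
  | c :: r => if c = ' ' then [] :: spw r else consHead [c] (spw r)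

lemma spw_ne_nil (cs : List Char) : spw cs ≠ [] := by
  cases cs with
  | nil => simp [spw]
  | cons c r =>
    simp only [spw]
    split
    · simp
    · cases h : spw r <;> simp [consHead]

lemma consHead_consHead (a b : List Char) (ps : List (List Char)) :
    consHead a (consHead b ps) = consHead (a ++ b) ps := by
  cases ps <;> simp [consHead]

lemma go_eq_spw (fuel : Nat) (l cur : List Char) (acc : List (List Char))
    (h : l.length < fuel) :
    PySem.Chars.splitOn.go [' '] fuel l cur acc = acc.reverse ++ consHead cur.reverse (spw l) := by
  induction fuel generalizing l cur acc with
  | zero => omega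
  | succ f ih =>
    cases l with
    | nil => simp [PySem.Chars.splitOn.go, spw, consHead]
    | cons c rest =>
      by_cases hc : c = ' '
      · subst hc
        have hpre : List.isPrefixOf [' '] (' ' :: rest) = true := by
          simp [List.isPrefixOf]
        rw [PySem.Chars.splitOn.go]
        simp only [hpre, if_pos]
        rw [ih _ _ _ (by simpa using Nat.lt_of_succ_lt_succ h)]
        obtain ⟨p, t, hpt⟩ : ∃ p t, spw rest = p :: t := by
          cases hsp : spw rest with
          | nil => exact absurd hsp (spw_ne_nil rest)
          | cons p t => exact ⟨p, t, rfl⟩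
        simp [spw, hpt, consHead]
      · have hpre : List.isPrefixOf [' '] (c :: rest) = false := by
          simp [List.isPrefixOf]; intro h'; exact hc h'.symm
        rw [PySem.Chars.splitOn.go]
        simp only [hpre, Bool.false_eq_true, if_neg, not_false_iff]
        rw [ih _ _ _ (by simpa using Nat.lt_of_succ_lt_succ h)]
        simp [spw, hc, consHead_consHead]

lemma splitOn_eq_spw (cs : List Char) : PySem.Chars.splitOn cs [' '] = spw cs := by
  rw [PySem.Chars.splitOn, go_eq_spw _ _ _ _ (by omega)]
  obtain ⟨p, t, hpt⟩ : ∃ p t, spw cs = p :: t := by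
    cases hsp : spw cs with
    | nil => exact absurd hsp (spw_ne_nil cs)
    | cons p t => exact ⟨p, t, rfl⟩
  simp [hpt, consHead]

lemma intercalate_cons_of_ne_nil (sep x : List Char) (ps : List (List Char)) (h : ps ≠ []) :
    List.intercalate sep (x :: ps) = x ++ sep ++ List.intercalate sep ps := by
  cases ps with
  | nil => exact absurd rfl h
  | cons p t => simp [List.intercalate, List.intersperse]

lemma spw_join (cs : List Char) : List.intercalate [' '] (spw cs) = cs := by
  induction cs with
  | nil => simp [spw, List.intercalate]
  | cons c r ih =>
    by_cases hc : c = ' '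
    · subst hc
      rw [spw, if_pos rfl, intercalate_cons_of_ne_nil _ _ _ (spw_ne_nil r), ih]
      simp
    · rw [spw, if_neg hc]
      obtain ⟨p, t, hpt⟩ : ∃ p t, spw r = p :: t := by
        cases hsp : spw r with
        | nil => exact absurd hsp (spw_ne_nil r)
        | cons p t => exact ⟨p, t, rfl⟩
      rw [hpt] at ih ⊢
      cases t with
      | nil =>
        simp only [consHead]
        simp only [List.intercalate, List.intersperse, List.flatten] at ih ⊢
        simp_all
      | cons p' t' =>
        rw [consHead, intercalate_cons_of_ne_nil _ _ _ (by simp)]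
        rw [intercalate_cons_of_ne_nil _ _ _ (by simp)] at ih
        rw [← ih]; simp

lemma spw_noSpace (cs : List Char) : ∀ w ∈ spw cs, ' ' ∉ w := by
  induction cs with
  | nil => simp [spw]
  | cons c r ih =>
    by_cases hc : c = ' '
    · subst hc
      have hs : spw (' ' :: r) = [] :: spw r := by simp [spw]
      rw [hs]
      rintro w hw
      rcases List.mem_cons.mp hw with rfl | hw
      · simp
      · exact ih w hw
    · simp only [spw, if_neg hc]
      obtain ⟨p, t, hpt⟩ : ∃ p t, spw r = p :: t := by
        cases hsp : spw r with
        | nil => exact absurd hsp (spw_ne_nil r)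
        | cons p t => exact ⟨p, t, rfl⟩
      rw [hpt]
      rintro w hw
      rcases List.mem_cons.mp hw with rfl | hw
      · intro hmem
        rcases List.mem_cons.mp hmem with h' | h'
        · exact hc h'.symm
        · exact ih p (hpt ▸ List.mem_cons_self) h'
      · exact ih w (hpt ▸ List.mem_cons_of_mem _ hw)

lemma lowerChar_eq_space_iff (c : Char) : PySem.Chars.lowerChar c = ' ' ↔ c = ' ' := by
  constructor
  · intro h
    unfold PySem.Chars.lowerChar at h
    split at h
    · rename_i hu
      unfold PySem.Chars.isupper at hu
      simp [Char.le_def, UInt32.le_iff_toNat_le] at hu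
      have hc2 : 65 ≤ c.toNat := hu.1
      have hc : c.toNat ≤ 90 := hu.2
      exfalso
      have h2 := congrArg Char.toNat h
      rw [Char.toNat_ofNat, if_pos (Or.inl (by omega))] at h2
      have h3 : (' ' : Char).toNat = 32 := by decide
      omega
    · exact h
  · intro h; subst h; decide

lemma map_consHead (f : Char → Char) (a : List Char) (ps : List (List Char)) :
    (consHead a ps).map (List.map f) = consHead (a.map f) (ps.map (List.map f)) := by
  cases ps <;> simp [consHead]

lemma spw_lower (cs : List Char) :
    spw (List.map PySem.Chars.lowerChar cs) = (spw cs).map (List.map PySem.Chars.lowerChar) := by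
  induction cs with
  | nil => simp [spw]
  | cons c r ih =>
    by_cases hc : c = ' '
    · subst hc
      have h1 : PySem.Chars.lowerChar ' ' = ' ' := by decide
      simp only [List.map_cons, h1]
      have hs : ∀ t, spw (' ' :: t) = [] :: spw t := fun t => by simp [spw]
      rw [hs, hs, ih]
      simp
    · have h1 : PySem.Chars.lowerChar c ≠ ' ' := fun h => hc ((lowerChar_eq_space_iff c).mp h)
      simp only [List.map_cons]
      rw [spw, if_neg h1, spw, if_neg hc, ih, map_consHead]
      simp

-- A-side loop characterisation
def ACond (w : List Char) : Prop :=
  (∃ p ∈ pvPfx, p <+: w) ∨ (∃ q ∈ pvSfx, q <:+ w)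

lemma loopA_true_iff (ws : List (List Char)) :
    prefsufxLoop ws = "True" ↔ ∃ w ∈ ws, ACond (PySem.Chars.lower w) := by
  induction ws with
  | nil => simp [prefsufxLoop]
  | cons w ws ih =>
    rw [prefsufxLoop]
    split_ifs with h1 h2
    · simp only [List.any_eq_true, PySem.Chars.startswith_iff] at h1
      exact ⟨fun _ => ⟨w, List.mem_cons_self, Or.inl h1⟩, fun _ => rfl⟩
    · simp only [List.any_eq_true, PySem.Chars.endswith_iff] at h2
      exact ⟨fun _ => ⟨w, List.mem_cons_self, Or.inr h2⟩, fun _ => rfl⟩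
    · simp only [List.any_eq_true, PySem.Chars.startswith_iff] at h1
      simp only [List.any_eq_true, PySem.Chars.endswith_iff] at h2
      rw [ih]
      constructor
      · rintro ⟨w', hw', hc⟩; exact ⟨w', List.mem_cons_of_mem _ hw', hc⟩
      · rintro ⟨w', hw', hc⟩
        rcases List.mem_cons.mp hw' with rfl | hw'
        · exact absurd hc (by rintro (h | h) <;> [exact h1 h; exact h2 h])
        · exact ⟨w', hw', hc⟩

lemma loopA_cases (ws : List (List Char)) :
    prefsufxLoop ws = "True" ∨ prefsufxLoop ws = "False" := by
  induction ws with
  | nil => simp [prefsufxLoop]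
  | cons w ws ih =>
    rw [prefsufxLoop]
    split_ifs <;> simp [ih]

-- B-side: boundary-hit predicates
def PB (s : List Char) (k : Nat) : Prop :=
  (k = 0 ∨ s[k-1]? = some ' ') ∧ ∃ p ∈ pvPfx, p <+: s.drop k

def SB (s : List Char) (k : Nat) : Prop :=
  (k = s.length ∨ s[k]? = some ' ') ∧ ∃ q ∈ pvSfx, q <:+ s.take k

-- the character tables of the B port are A's tuples
lemma bPfx_eq : bPfx = pvPfx := by decide
lemma bSfx_eq : bSfx = pvSfx := by decide

-- the getD boundary tests agree with the option-valued form while in range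
lemma start_cond_iff (s : List Char) (k : Nat) (hk : k ≤ s.length) :
    (k = 0 ∨ s.getD (k-1) '_' = ' ') ↔ (k = 0 ∨ s[k-1]? = some ' ') := by
  cases k with
  | zero => simp
  | succ m =>
    have hm : m < s.length := by omega
    simp only [Nat.succ_ne_zero, false_or, Nat.add_sub_cancel]
    rw [List.getD_eq_getElem?_getD, List.getElem?_eq_getElem hm]
    simp

lemma end_cond_iff (s : List Char) (k : Nat) (hk : k ≤ s.length) :
    (k = s.length ∨ s.getD k '_' = ' ') ↔ (k = s.length ∨ s[k]? = some ' ') := by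
  by_cases hkl : k = s.length
  · simp [hkl]
  · have hm : k < s.length := by omega
    simp only [hkl, false_or]
    rw [List.getD_eq_getElem?_getD, List.getElem?_eq_getElem hm]
    simp

lemma bScan_true_iff (s : List Char) (i : Nat) :
    bScan s i = "True" ↔ ∃ k, i ≤ k ∧ k ≤ s.length ∧ (PB s k ∨ SB s k) := by
  generalize hn : s.length + 1 - i = n
  induction n generalizing i with
  | zero =>
    have hi : s.length < i := by omega
    rw [bScan, dif_pos hi]
    constructor
    · intro h; exact absurd h (by decide)
    · rintro ⟨k, hk1, hk2, _⟩; omega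
  | succ n ih =>
    have hi : ¬ s.length < i := by omega
    rw [bScan, dif_neg hi]
    split_ifs with h1 h2
    · obtain ⟨h1a, h1b⟩ := h1
      simp only [List.any_eq_true, List.isPrefixOf_iff_prefix, bPfx_eq] at h1b
      refine ⟨fun _ => ⟨i, le_refl i, by omega, Or.inl ⟨?_, h1b⟩⟩, fun _ => rfl⟩
      exact (start_cond_iff s i (by omega)).mp h1a
    · obtain ⟨h2a, h2b⟩ := h2
      simp only [List.any_eq_true, List.isSuffixOf_iff_suffix, bSfx_eq] at h2b
      refine ⟨fun _ => ⟨i, le_refl i, by omega, Or.inr ⟨?_, h2b⟩⟩, fun _ => rfl⟩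
      exact (end_cond_iff s i (by omega)).mp h2a
    · rw [ih (i+1) (by omega)]
      constructor
      · rintro ⟨k, hk1, hk2, hc⟩; exact ⟨k, by omega, hk2, hc⟩
      · rintro ⟨k, hk1, hk2, hc⟩
        rcases Nat.lt_or_ge i k with hik | hik
        · exact ⟨k, by omega, hk2, hc⟩
        · exfalso
          have hki : k = i := by omega
          subst hki
          rcases hc with ⟨ha, p, hp, hpre⟩ | ⟨ha, q, hq, hsuf⟩
          · exact h1 ⟨(start_cond_iff s k (by omega)).mpr ha,
              by simp only [List.any_eq_true, List.isPrefixOf_iff_prefix, bPfx_eq];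
                 exact ⟨p, hp, hpre⟩⟩
          · exact h2 ⟨(end_cond_iff s k (by omega)).mpr ha,
              by simp only [List.any_eq_true, List.isSuffixOf_iff_suffix, bSfx_eq];
                 exact ⟨q, hq, hsuf⟩⟩

lemma bScan_cases (s : List Char) (i : Nat) :
    bScan s i = "True" ∨ bScan s i = "False" := by
  generalize hn : s.length + 1 - i = n
  induction n generalizing i with
  | zero =>
    have hi : s.length < i := by omega
    rw [bScan, dif_pos hi]; simp
  | succ n ih =>
    by_cases hi : s.length < i
    · rw [bScan, dif_pos hi]; simp
    · rw [bScan, dif_neg hi]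
      split_ifs <;> simp [ih (i+1) (by omega)]

-- the word-boundary lemmas
lemma prefix_append_space (p u v : List Char) (hp : ' ' ∉ p) :
    p <+: (u ++ ' ' :: v) ↔ p <+: u := by
  constructor
  · intro h
    by_cases hl : p.length ≤ u.length
    · have h1 : p = (u ++ ' ' :: v).take p.length := List.prefix_iff_eq_take.mp h
      rw [List.take_append_of_le_length hl] at h1
      rw [h1]; exact List.take_prefix _ _
    · exfalso
      have hu : u.length < p.length := by omega
      have h2 : p[u.length]'hu = (u ++ ' ' :: v)[u.length]'(by simp only [List.length_append, List.length_cons]; omega) :=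
        List.IsPrefix.getElem h hu
      rw [List.getElem_append_right (le_refl u.length)] at h2
      simp only [Nat.sub_self, List.getElem_cons_zero] at h2
      exact hp (h2 ▸ List.getElem_mem hu)
  · intro h
    exact h.trans (List.prefix_append u (' ' :: v))

lemma suffix_append_space (q u v : List Char) (hq : ' ' ∉ q) :
    q <:+ (u ++ ' ' :: v) ↔ q <:+ v := by
  have hrev : (u ++ ' ' :: v).reverse = v.reverse ++ ' ' :: u.reverse := by simp
  constructor
  · intro h
    have h1 : q.reverse <+: (u ++ ' ' :: v).reverse := List.reverse_prefix.mpr h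
    rw [hrev] at h1
    have h2 := (prefix_append_space q.reverse v.reverse u.reverse
      (by simpa using hq)).mp h1
    exact List.reverse_prefix.mp h2
  · intro h
    have : v <:+ (u ++ [' ']) ++ v := List.suffix_append _ v
    simpa using h.trans this

lemma pvPfx_noSpace : ∀ p ∈ pvPfx, ' ' ∉ p := by decide
lemma pvSfx_noSpace : ∀ q ∈ pvSfx, ' ' ∉ q := by decide

lemma no_space_getElem? (w : List Char) (hw : ' ' ∉ w) (i : Nat) : w[i]? ≠ some ' ' := by
  intro h
  rcases List.getElem?_eq_some_iff.mp h with ⟨hi, hval⟩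
  exact hw (hval ▸ List.getElem_mem hi)

lemma PB_single (w : List Char) (k : Nat) (hw : ' ' ∉ w) (hk : k ≤ w.length) :
    PB w k ↔ (k = 0 ∧ ∃ p ∈ pvPfx, p <+: w) := by
  unfold PB
  constructor
  · rintro ⟨hc, p, hp, hpre⟩
    have hk0 : k = 0 := by
      rcases hc with h | h
      · exact h
      · exact absurd h (no_space_getElem? w hw _)
    subst hk0
    exact ⟨rfl, p, hp, by simpa using hpre⟩
  · rintro ⟨rfl, p, hp, hpre⟩
    exact ⟨Or.inl rfl, p, hp, by simpa using hpre⟩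

lemma SB_single (w : List Char) (k : Nat) (hw : ' ' ∉ w) (hk : k ≤ w.length) :
    SB w k ↔ (k = w.length ∧ ∃ q ∈ pvSfx, q <:+ w) := by
  unfold SB
  constructor
  · rintro ⟨hc, q, hq, hsuf⟩
    have hkl : k = w.length := hc.resolve_right (no_space_getElem? w hw k)
    subst hkl
    exact ⟨rfl, q, hq, by simpa using hsuf⟩
  · rintro ⟨rfl, q, hq, hsuf⟩
    exact ⟨Or.inl rfl, q, hq, by simpa using hsuf⟩

lemma PB_low (w rest : List Char) (k : Nat) (hw : ' ' ∉ w) (hk : k ≤ w.length) :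
    PB (w ++ ' ' :: rest) k ↔ (k = 0 ∧ ∃ p ∈ pvPfx, p <+: w) := by
  unfold PB
  constructor
  · rintro ⟨hc, p, hp, hpre⟩
    have hk0 : k = 0 := by
      rcases hc with h | h
      · exact h
      · by_contra hne
        have hlt : k - 1 < w.length := by omega
        rw [List.getElem?_append_left hlt] at h
        exact no_space_getElem? w hw _ h
    subst hk0
    rw [List.drop_zero, prefix_append_space p w rest (pvPfx_noSpace p hp)] at hpre
    exact ⟨rfl, p, hp, hpre⟩
  · rintro ⟨rfl, p, hp, hpre⟩
    refine ⟨Or.inl rfl, p, hp, ?_⟩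
    rw [List.drop_zero, prefix_append_space p w rest (pvPfx_noSpace p hp)]
    exact hpre

lemma SB_low (w rest : List Char) (k : Nat) (hw : ' ' ∉ w) (hk : k ≤ w.length) :
    SB (w ++ ' ' :: rest) k ↔ (k = w.length ∧ ∃ q ∈ pvSfx, q <:+ w) := by
  unfold SB
  have hlen : (w ++ ' ' :: rest).length = w.length + 1 + rest.length := by
    simp only [List.length_append, List.length_cons]; omega
  have htake : (w ++ ' ' :: rest).take w.length = w := by
    have h0 := List.take_length_add_append (l₁ := w) (l₂ := ' ' :: rest) 0
    simp only [List.take_zero, List.append_nil, Nat.add_zero] at h0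
    exact h0
  have hget : (w ++ ' ' :: rest)[w.length]? = some ' ' := by
    rw [List.getElem?_append_right (le_refl w.length)]
    simp
  constructor
  · rintro ⟨hc, q, hq, hsuf⟩
    have hkn : k = w.length := by
      rcases hc with h | h
      · omega
      · by_cases hkw : k < w.length
        · rw [List.getElem?_append_left hkw] at h
          exact absurd h (no_space_getElem? w hw k)
        · omega
    subst hkn
    rw [htake] at hsuf
    exact ⟨rfl, q, hq, hsuf⟩
  · rintro ⟨rfl, q, hq, hsuf⟩
    exact ⟨Or.inr hget, q, hq, by rw [htake]; exact hsuf⟩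

lemma PB_shift (w rest : List Char) (j : Nat) :
    PB (w ++ ' ' :: rest) (w.length + 1 + j) ↔ PB rest j := by
  unfold PB
  have hdrop : (w ++ ' ' :: rest).drop (w.length + 1 + j) = rest.drop j := by
    rw [show w.length + 1 + j = w.length + (1 + j) by omega, List.drop_length_add_append]
    rw [show 1 + j = j + 1 by omega]
    simp
  rw [hdrop]
  have hcond : (w.length + 1 + j = 0 ∨ (w ++ ' ' :: rest)[w.length + 1 + j - 1]? = some ' ')
      ↔ (j = 0 ∨ rest[j - 1]? = some ' ') := by
    cases j with
    | zero =>
      have hget : (w ++ ' ' :: rest)[w.length + 1 + 0 - 1]? = some ' ' := by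
        rw [show w.length + 1 + 0 - 1 = w.length by omega,
            List.getElem?_append_right (le_refl w.length)]
        simp
      simp
    | succ m =>
      have hget : (w ++ ' ' :: rest)[w.length + 1 + (m + 1) - 1]? = rest[m]? := by
        rw [show w.length + 1 + (m + 1) - 1 = w.length + (m + 1) by omega,
            List.getElem?_append_right (by omega)]
        rw [show w.length + (m + 1) - w.length = m + 1 by omega, List.getElem?_cons_succ]
      rw [hget]
      simp
  rw [hcond]

lemma SB_shift (w rest : List Char) (j : Nat) :
    SB (w ++ ' ' :: rest) (w.length + 1 + j) ↔ SB rest j := by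
  unfold SB
  have hlen : (w ++ ' ' :: rest).length = w.length + 1 + rest.length := by
    simp only [List.length_append, List.length_cons]; omega
  have htake : (w ++ ' ' :: rest).take (w.length + 1 + j) = w ++ ' ' :: rest.take j := by
    rw [show w.length + 1 + j = w.length + (1 + j) by omega, List.take_length_add_append]
    rw [show 1 + j = j + 1 by omega]
    simp
  have hget : (w ++ ' ' :: rest)[w.length + 1 + j]? = rest[j]? := by
    rw [List.getElem?_append_right (by omega)]
    rw [show w.length + 1 + j - w.length = j + 1 by omega, List.getElem?_cons_succ]
  rw [htake, hget]
  constructor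
  · rintro ⟨hc, q, hq, hsuf⟩
    refine ⟨?_, q, hq, (suffix_append_space q w (rest.take j) (pvSfx_noSpace q hq)).mp hsuf⟩
    rcases hc with h | h
    · left; omega
    · right; exact h
  · rintro ⟨hc, q, hq, hsuf⟩
    refine ⟨?_, q, hq, (suffix_append_space q w (rest.take j) (pvSfx_noSpace q hq)).mpr hsuf⟩
    rcases hc with h | h
    · left; omega
    · right; exact h

-- the main correspondence on an intercalated word list
lemma hit_iff (ws : List (List Char)) (hne : ws ≠ []) (hsp : ∀ w ∈ ws, ' ' ∉ w) :
    (∃ k, 0 ≤ k ∧ k ≤ (List.intercalate [' '] ws).length ∧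
        (PB (List.intercalate [' '] ws) k ∨ SB (List.intercalate [' '] ws) k)) ↔
      ∃ w ∈ ws, ACond w := by
  induction ws with
  | nil => exact absurd rfl hne
  | cons w ws ih =>
    by_cases hws : ws = []
    · subst hws
      have hI : List.intercalate [' '] [w] = w := by simp [List.intercalate]
      rw [hI]
      have hw : ' ' ∉ w := hsp w List.mem_cons_self
      constructor
      · rintro ⟨k, -, hk2, hc⟩
        rcases hc with h | h
        · rcases (PB_single w k hw hk2).mp h with ⟨-, hp⟩
          exact ⟨w, List.mem_cons_self, Or.inl hp⟩
        · rcases (SB_single w k hw hk2).mp h with ⟨-, hq⟩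
          exact ⟨w, List.mem_cons_self, Or.inr hq⟩
      · rintro ⟨w', hw', hac⟩
        have heq : w' = w := by simpa using hw'
        subst heq
        rcases hac with hp | hq
        · exact ⟨0, Nat.zero_le _, Nat.zero_le _,
            Or.inl ((PB_single w' 0 hw (Nat.zero_le _)).mpr ⟨rfl, hp⟩)⟩
        · exact ⟨w'.length, Nat.zero_le _, le_refl _,
            Or.inr ((SB_single w' w'.length hw (le_refl _)).mpr ⟨rfl, hq⟩)⟩
    · have hI : List.intercalate [' '] (w :: ws) = w ++ ' ' :: List.intercalate [' '] ws := by
        rw [intercalate_cons_of_ne_nil _ _ _ hws]; simp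
      rw [hI]
      set rest := List.intercalate [' '] ws with hrest
      have hw : ' ' ∉ w := hsp w List.mem_cons_self
      have hlen : (w ++ ' ' :: rest).length = w.length + 1 + rest.length := by
        simp only [List.length_append, List.length_cons]; omega
      have ihh := ih hws (fun w' h => hsp w' (List.mem_cons_of_mem _ h))
      constructor
      · rintro ⟨k, -, hk2, hc⟩
        by_cases hkn : k ≤ w.length
        · rcases hc with h | h
          · rcases (PB_low w rest k hw hkn).mp h with ⟨-, hp⟩
            exact ⟨w, List.mem_cons_self, Or.inl hp⟩
          · rcases (SB_low w rest k hw hkn).mp h with ⟨-, hq⟩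
            exact ⟨w, List.mem_cons_self, Or.inr hq⟩
        · set j := k - w.length - 1 with hjdef
          have hj : k = w.length + 1 + j := by omega
          have hj2 : j ≤ rest.length := by omega
          rw [hj] at hc
          have hc' : PB rest j ∨ SB rest j := by
            rcases hc with h | h
            · exact Or.inl ((PB_shift w rest j).mp h)
            · exact Or.inr ((SB_shift w rest j).mp h)
          rcases ihh.mp ⟨j, Nat.zero_le _, hj2, hc'⟩ with ⟨w', hw', hac⟩
          exact ⟨w', List.mem_cons_of_mem _ hw', hac⟩
      · rintro ⟨w', hw', hac⟩
        rcases List.mem_cons.mp hw' with heq | hmem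
        · subst heq
          rcases hac with hp | hq
          · exact ⟨0, Nat.zero_le _, Nat.zero_le _,
              Or.inl ((PB_low w' rest 0 hw (Nat.zero_le _)).mpr ⟨rfl, hp⟩)⟩
          · exact ⟨w'.length, Nat.zero_le _, by omega,
              Or.inr ((SB_low w' rest w'.length hw (le_refl _)).mpr ⟨rfl, hq⟩)⟩
        · rcases ihh.mpr ⟨w', hmem, hac⟩ with ⟨j, -, hj2, hc⟩
          refine ⟨w.length + 1 + j, Nat.zero_le _, by omega, ?_⟩
          rcases hc with h | h
          · exact Or.inl ((PB_shift w rest j).mpr h)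
          · exact Or.inr ((SB_shift w rest j).mpr h)

-- ===== VERDICT (by name: the statement is the Claim_ definition above) =====
theorem prefsufx_spec : Claim_equal_prefsufx := by
  unfold Claim_equal_prefsufx
  intro line _
  unfold Spec_prefsufx prefsufx prefsufx_alt
  rw [splitOn_eq_spw]
  have hiff : prefsufxLoop (spw line.toList) = "True" ↔
      bScan (PySem.Chars.lower line.toList) 0 = "True" := by
    rw [loopA_true_iff, bScan_true_iff]
    have hjoin : List.intercalate [' '] (spw (PySem.Chars.lower line.toList)) =
        PySem.Chars.lower line.toList := spw_join _
    rw [← hjoin,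
        hit_iff (spw (PySem.Chars.lower line.toList)) (spw_ne_nil _) (spw_noSpace _)]
    simp only [PySem.Chars.lower, spw_lower, List.mem_map]
    constructor
    · rintro ⟨w, hw, hac⟩
      exact ⟨List.map PySem.Chars.lowerChar w, ⟨w, hw, rfl⟩, hac⟩
    · rintro ⟨w', ⟨w, hw, rfl⟩, hac⟩
      exact ⟨w, hw, hac⟩
  rcases loopA_cases (spw line.toList) with h | h <;>
    rcases bScan_cases (PySem.Chars.lower line.toList) 0 with h2 | h2
  · rw [h, h2]
  · exact absurd (hiff.mp h) (by rw [h2]; decide)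
  · exact absurd (hiff.mpr h2) (by rw [h]; decide)
  · rw [h, h2]
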